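-- pv_equiv track=rewrite | github.com/teyandeymain1/01-python-codes | 01_codes/01_競プロ用/02_過去問/C問題/20221224C別解.py | compare_neighbor_in_list
-- ===== SOURCE A (Python) =====
-- def compare_neighbor_in_list(rcrsVal, valList, inputList):
--
--     #-----------以下に操作に必要な変数を書く--------------
--     valList = [0,0] #一番目の変数が0のペアの個数を記録、二番目の変数が0を見つけた回数を記録
--     #----------------ここまで------------------------
--     inputList = inputList + ["?"]
--
--     flag = "down"
--
--     for i in range(len(inputList) - 1):
--         if inputList[i] == 0 and inputList[i] == inputList[i+1]:
--             flag = "up"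
--         #--------以下に配列内のある要素とその隣の要素を比較したときを操作するコードを書く。以下はダブってる要素のペア数を数えるコード------------
--             valList[-1] += 1
--         #----------------ここまで----------------------------------
--         else:
--             if flag == "up":
--                 valList[-1] += 1
--                 valList[-2] = valList[-2] + valList[-1] // 2
--                 valList[-1] = 0
--                 flag = "down"
--
--     return valList[-2]
-- ===== SOURCE B (Python) =====
-- def compare_neighbor_in_list(rcrsVal, valList, inputList):
--     # Run-length scan: consume each maximal run of equal elements at once;
--     # a run of zeros of length m contributes m // 2 pairs.
--     total = 0
--     rest = inputList
--     while rest: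
--         x = rest[0]
--         runlen = 1
--         rest = rest[1:]
--         while rest and rest[0] == x:
--             runlen += 1
--             rest = rest[1:]
--         if x == 0:
--             total += runlen // 2
--     return total
-- ===== Notes on version B (the rewrite author's own statement) =====
-- stated objective: simpler
-- what changed: Replaced A's sentinel-terminated adjacent-pair walk with a flag/counter state machine by a run-length scan that consumes each maximal run of equal elements at once and adds run_length // 2 for runs of zeros.
import Mathlib
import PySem

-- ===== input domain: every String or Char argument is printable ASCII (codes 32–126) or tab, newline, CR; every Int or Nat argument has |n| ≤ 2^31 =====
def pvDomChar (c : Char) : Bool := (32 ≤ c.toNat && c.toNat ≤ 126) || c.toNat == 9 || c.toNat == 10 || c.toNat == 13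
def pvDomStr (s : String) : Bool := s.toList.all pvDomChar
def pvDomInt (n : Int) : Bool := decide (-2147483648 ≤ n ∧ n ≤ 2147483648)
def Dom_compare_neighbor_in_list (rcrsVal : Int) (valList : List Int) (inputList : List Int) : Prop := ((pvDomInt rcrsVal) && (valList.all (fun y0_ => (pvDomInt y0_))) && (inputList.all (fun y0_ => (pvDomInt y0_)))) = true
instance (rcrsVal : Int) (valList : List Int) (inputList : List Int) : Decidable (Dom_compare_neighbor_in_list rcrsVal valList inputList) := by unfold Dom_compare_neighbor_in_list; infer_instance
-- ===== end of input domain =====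

-- B replaces A's sentinel-terminated adjacent-pair walk with a run-length scan that
-- consumes each maximal run of equal elements at once (objective: simpler).
-- A reassigns its parameters `valList` and `inputList` locally only; no caller-visible mutation.

-- ===== PORT A =====
-- A appends the string sentinel "?" to the Int list; ported as `Option Int`
-- (`none` = the sentinel, which Python's `==` never equates with an int) — exact here.
-- The `for i in range(len(inputList)-1)` loop reads `inputList[i]` and `inputList[i+1]`:
-- ported as structural recursion over adjacent pairs with the same state
-- (flag : String, valList[-2] = v1, valList[-1] = v2).
def loopA : List (Option Int) → String → Int → Int → Int
  | x :: y :: rest, flag, v1, v2 =>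
      if x = some 0 ∧ x = y then
        loopA (y :: rest) "up" v1 (v2 + 1)
      else if flag = "up" then
        loopA (y :: rest) "down" (v1 + PySem.Int.floordiv (v2 + 1) 2) 0
      else
        loopA (y :: rest) flag v1 v2
  | _, _, v1, _ => v1

def compare_neighbor_in_list (rcrsVal : Int) (valList : List Int) (inputList : List Int) : Int :=
  loopA (inputList.map some ++ [none]) "down" 0 0

-- ===== PORT B =====
-- inner `while rest and rest[0] == x`: returns (number of further copies of x consumed, remainder)
def takeRun (x : Int) : List Int → Nat × List Int
  | [] => (0, [])
  | y :: rest => if y = x then ((takeRun x rest).1 + 1, (takeRun x rest).2) else (0, y :: rest)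

theorem takeRun_len (x : Int) (l : List Int) : (takeRun x l).2.length ≤ l.length := by
  induction l with
  | nil => simp [takeRun]
  | cons y rest ih =>
      simp only [takeRun]
      split
      · exact Nat.le_succ_of_le ih
      · simp

-- outer `while rest` with accumulator `total`
def bLoop : List Int → Int → Int
  | [], total => total
  | x :: rest, total =>
      bLoop (takeRun x rest).2
        (if x = 0 then total + PySem.Int.floordiv (((takeRun x rest).1 : Int) + 1) 2 else total)
  termination_by l _ => l.length
  decreasing_by exact Nat.lt_succ_of_le (takeRun_len x rest)

def compare_neighbor_in_list_alt (rcrsVal : Int) (valList : List Int) (inputList : List Int) : Int :=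
  bLoop inputList 0

-- ===== PRECONDITION & SPEC =====
def Spec_compare_neighbor_in_list (rcrsVal : Int) (valList : List Int) (inputList : List Int) (out : Int) : Prop := out = compare_neighbor_in_list_alt rcrsVal valList inputList
instance (rcrsVal : Int) (valList : List Int) (inputList : List Int) (out : Int) : Decidable (Spec_compare_neighbor_in_list rcrsVal valList inputList out) := by unfold Spec_compare_neighbor_in_list; infer_instance

-- ===== CLAIM (what is proved, stated in full; the proofs are below) =====
def Claim_equal_compare_neighbor_in_list : Prop := ∀ (rcrsVal : Int) (valList : List Int) (inputList : List Int), Dom_compare_neighbor_in_list rcrsVal valList inputList → Spec_compare_neighbor_in_list rcrsVal valList inputList (compare_neighbor_in_list rcrsVal valList inputList)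

-- ===== LEMMAS AND PROOFS =====

-- a run head that is not 0 contributes nothing, so B may as well consume it one by one
theorem bLoop_cons_ne_zero (x : Int) (hx : x ≠ 0) : ∀ (xs : List Int) (t : Int),
    bLoop (x :: xs) t = bLoop xs t := by
  intro xs
  induction xs with
  | nil => intro t; simp [bLoop, takeRun]
  | cons y rest ih =>
      intro t
      by_cases hy : y = x
      · subst hy
        simp [bLoop, takeRun, hx]
      · simp [bLoop, takeRun, hy, hx]

-- A's loop in the "down" state skips a nonzero head outright
theorem loopA_down_ne (x : Int) (hx : x ≠ 0) (xs : List Int) (v1 : Int) :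
    loopA (some x :: (xs.map some ++ [none])) "down" v1 0 =
      loopA (xs.map some ++ [none]) "down" v1 0 := by
  cases xs with
  | nil => simp [loopA, hx]
  | cons z rest => simp [loopA, hx]

-- joint invariant: A's "down" state matches B from the current remainder, and A's "up"
-- state (current element 0, v2 = k pair-increments so far) matches B having charged
-- (k + 1 + length of the remaining zero run) // 2 for the run in progress.
theorem loopA_bLoop (n : Nat) : ∀ (xs : List Int), xs.length ≤ n →
    (∀ v1 : Int, loopA (xs.map some ++ [none]) "down" v1 0 = bLoop xs v1) ∧
    (∀ (v1 k : Int), loopA (some 0 :: (xs.map some ++ [none])) "up" v1 k =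
      bLoop (takeRun 0 xs).2 (v1 + PySem.Int.floordiv (k + 1 + ((takeRun 0 xs).1 : Int)) 2)) := by
  induction n with
  | zero =>
      intro xs h
      have hxs : xs = [] := List.length_eq_zero_iff.mp (Nat.le_zero.mp h)
      subst hxs
      refine ⟨fun v1 => by simp [loopA, bLoop], fun v1 k => by simp [loopA, takeRun, bLoop]⟩
  | succ n ih =>
      intro xs h
      constructor
      · intro v1
        match xs, h with
        | [], _ => simp [loopA, bLoop]
        | x :: xs', h =>
          by_cases hx : x = 0
          · subst hx
            match xs', h with
            | [], _ =>
                simp [loopA, bLoop, takeRun]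
            | y :: xs'', h =>
              by_cases hy : y = 0
              · subst hy
                have hlen : xs''.length ≤ n := by simp at h; omega
                have h2 := (ih xs'' hlen).2 v1 1
                have harith : (1:Int) + 1 + ((takeRun 0 xs'').1 : Int) =
                    (((takeRun 0 xs'').1 : Int) + 1) + 1 := by ring
                rw [harith] at h2
                simp only [List.map_cons, List.cons_append, loopA, if_true, zero_add, and_self]
                rw [h2]
                simp [bLoop, takeRun]
              · have hlen : (y :: xs'').length ≤ n := by simp at h ⊢; omega
                have h1 := (ih (y :: xs'') hlen).1 v1
                simp only [List.map_cons, List.cons_append] at h1 ⊢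
                simp only [loopA,
                  if_neg (show ¬ (("down":String) = "up") from by decide)]
                rw [h1]
                simp [bLoop, takeRun, hy]
                intro h0
                exact absurd h0.symm hy
          · have hlen : xs'.length ≤ n := by simp at h; omega
            have h1 := (ih xs' hlen).1 v1
            simp only [List.map_cons, List.cons_append]
            rw [loopA_down_ne x hx, h1, bLoop_cons_ne_zero x hx]
      · intro v1 k
        match xs, h with
        | [], _ => simp [loopA, takeRun, bLoop]
        | y :: xs', h =>
          by_cases hy : y = 0
          · subst hy
            have hlen : xs'.length ≤ n := by simp at h; omega
            have h2 := (ih xs' hlen).2 v1 (k + 1)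
            have harith : k + 1 + 1 + ((takeRun 0 xs').1 : Int) =
                k + 1 + (((takeRun 0 xs').1 : Int) + 1) := by ring
            rw [harith] at h2
            simp only [List.map_cons, List.cons_append, loopA, and_self, if_true]
            rw [h2]
            simp [takeRun]
          · have hlen : xs'.length ≤ n := by simp at h; omega
            have h1 := (ih xs' hlen).1 (v1 + PySem.Int.floordiv (k + 1) 2)
            simp only [List.map_cons, List.cons_append]
            simp only [loopA]
            rw [loopA_down_ne y hy, h1]
            simp [takeRun, hy, bLoop_cons_ne_zero y hy]
            intro h0
            exact absurd h0.symm hy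

-- ===== VERDICT (by name: the statement is the Claim_ definition above) =====
theorem compare_neighbor_in_list_spec : Claim_equal_compare_neighbor_in_list := by
  intro r v l _
  unfold Spec_compare_neighbor_in_list compare_neighbor_in_list compare_neighbor_in_list_alt
  exact (loopA_bLoop l.length l le_rfl).1 0
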